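-- pv_equiv track=rewrite | github.com/Godofga/rootFinder | adjustment.py | divided_dif_operator_simple
-- ===== SOURCE A (Python) =====
-- def divided_dif_operator_simple(points):
--     difs_ord=[]
--     for i in range(len(points)):
--         list_dif = []
--         if i==0:
--             for j in range(len(points)):
--                 list_dif.append(points[j][1])
--         else:
--             for j in range(len(difs_ord[i-1])-1):
--                 list_dif.append(difs_ord[i-1][j+1] - difs_ord[i-1][j])
--         difs_ord.append(list_dif)
--
--     return difs_ord
-- ===== SOURCE B (Python) =====
-- def divided_dif_operator_simple(points):
--     def rec(lst):
--         if not lst: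
--             return []
--         if len(lst) == 1:
--             return [lst]
--         return [lst] + rec([lst[j + 1] - lst[j] for j in range(len(lst) - 1)])
--     return rec([p[1] for p in points])
-- ===== Notes on version B (the rewrite author's own statement) =====
-- stated objective: simpler
-- what changed: Replaces the indexed level-by-level loop (which re-reads difs_ord[i-1] by index) with a short recursion over the shrinking difference list, eliminating all index bookkeeping.
import Mathlib
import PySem

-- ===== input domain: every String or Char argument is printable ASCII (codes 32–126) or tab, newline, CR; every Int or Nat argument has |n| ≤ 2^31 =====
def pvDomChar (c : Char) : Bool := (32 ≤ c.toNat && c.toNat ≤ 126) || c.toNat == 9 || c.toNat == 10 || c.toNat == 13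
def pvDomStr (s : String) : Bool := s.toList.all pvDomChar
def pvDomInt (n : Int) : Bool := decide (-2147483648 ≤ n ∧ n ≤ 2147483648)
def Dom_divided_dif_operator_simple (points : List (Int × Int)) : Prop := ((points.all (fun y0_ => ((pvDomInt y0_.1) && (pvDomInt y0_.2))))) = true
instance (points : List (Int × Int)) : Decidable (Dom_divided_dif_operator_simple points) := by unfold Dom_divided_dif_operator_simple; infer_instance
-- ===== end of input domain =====

-- B replaces A's indexed level-by-level loop by a recursion over the shrinking
-- difference list (same values, same subtraction order); objective: simpler.

-- ===== PORT A =====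
-- loop body of A's outer 'for i in range(len(points))' (difs_ord is the accumulator)
def pvStepA (points : List (Int × Int)) (difs_ord : List (List Int)) (i : Int) : List (List Int) :=
  let list_dif : List Int :=
    if i = 0 then
      (PySem.List.pyRange 0 (points.length : Int)).foldl
        (fun acc j => acc ++ [(PySem.List.pyGetD points j ((0 : Int), (0 : Int))).2]) []
    else
      (PySem.List.pyRange 0 (((PySem.List.pyGetD difs_ord (i - 1) []).length : Int) - 1)).foldl
        (fun acc j => acc ++ [PySem.List.pyGetD (PySem.List.pyGetD difs_ord (i - 1) []) (j + 1) 0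
            - PySem.List.pyGetD (PySem.List.pyGetD difs_ord (i - 1) []) j 0]) []
  difs_ord ++ [list_dif]

def divided_dif_operator_simple (points : List (Int × Int)) : List (List Int) :=
  (PySem.List.pyRange 0 (points.length : Int)).foldl (pvStepA points) []

-- ===== PORT B =====
-- the list comprehension [lst[j+1]-lst[j] for j in range(len(lst)-1)]
def pvDiffB (lst : List Int) : List Int :=
  (PySem.List.pyRange 0 ((lst.length : Int) - 1)).map
    (fun j => PySem.List.pyGetD lst (j + 1) 0 - PySem.List.pyGetD lst j 0)

-- needed by the port's termination proof, hence above it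
theorem pvDiffB_length (lst : List Int) : (pvDiffB lst).length = lst.length - 1 := by
  unfold pvDiffB
  rcases Nat.eq_zero_or_pos lst.length with h | h
  · rw [List.length_eq_zero_iff] at h
    subst h; rfl
  · have hc : ((lst.length : Int) - 1) = ((lst.length - 1 : Nat) : Int) := by omega
    rw [hc, PySem.List.pyRange_zero_natCast]
    simp

def pvRecB (lst : List Int) : List (List Int) :=
  if lst = [] then []
  else if lst.length = 1 then [lst]
  else [lst] ++ pvRecB (pvDiffB lst)
termination_by lst.length
decreasing_by
  rename_i h1 _
  rw [pvDiffB_length]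
  have : lst.length ≠ 0 := fun h => h1 (List.length_eq_zero_iff.mp h)
  omega

def divided_dif_operator_simple_alt (points : List (Int × Int)) : List (List Int) :=
  pvRecB (points.map (fun p => p.2))

-- ===== PRECONDITION & SPEC =====
def Spec_divided_dif_operator_simple (points : List (Int × Int)) (out : List (List Int)) : Prop := out = divided_dif_operator_simple_alt points
instance (points : List (Int × Int)) (out : List (List Int)) : Decidable (Spec_divided_dif_operator_simple points out) := by unfold Spec_divided_dif_operator_simple; infer_instance

-- ===== CLAIM (what is proved, stated in full; the proofs are below) =====
def Claim_equal_divided_dif_operator_simple : Prop := ∀ (points : List (Int × Int)), Dom_divided_dif_operator_simple points → Spec_divided_dif_operator_simple points (divided_dif_operator_simple points)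

-- ===== LEMMAS AND PROOFS =====

-- the triangle of successive difference lists below a given level
def pvChain : Nat → List Int → List (List Int)
  | 0, _ => []
  | m + 1, l => pvDiffB l :: pvChain m (pvDiffB l)

theorem pvStepA_pos (points : List (Int × Int)) (acc : List (List Int)) (h : acc ≠ [])
    (i : Int) (hi : i = (acc.length : Int)) :
    pvStepA points acc i = acc ++ [pvDiffB (acc.getLast h)] := by
  have hlen : acc.length ≠ 0 := fun h0 => h (List.length_eq_zero_iff.mp h0)
  have hi0 : i ≠ 0 := by omega
  have hidx : i - 1 = ((acc.length - 1 : Nat) : Int) := by omega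
  have hget : PySem.List.pyGetD acc (i - 1) [] = acc.getLast h := by
    rw [hidx, PySem.List.pyGetD_natCast, List.getLast_eq_getElem,
        List.getD_eq_getElem acc [] (by omega)]
  unfold pvStepA
  rw [if_neg hi0, hget, PySem.List.foldl_append_singleton_eq_map]
  rfl

theorem pvFoldA (points : List (Int × Int)) (m : Nat) :
    ∀ (acc : List (List Int)) (h : acc ≠ []),
    (PySem.List.pyRange (acc.length : Int) ((acc.length : Int) + (m : Int))).foldl (pvStepA points) acc
      = acc ++ pvChain m (acc.getLast h) := by
  induction m with
  | zero =>
    intro acc h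
    simp [PySem.List.pyRange, pvChain]
  | succ m ih =>
    intro acc h
    have hre : ((acc.length : Int)) + ((m + 1 : Nat) : Int) = ((acc.length : Int) + 1) + (m : Int) := by
      push_cast; ring
    rw [hre, PySem.List.pyRange_one_cons (by omega), List.foldl_cons, pvStepA_pos points acc h _ rfl]
    have hne : acc ++ [pvDiffB (acc.getLast h)] ≠ [] := by simp
    have hlen : ((acc ++ [pvDiffB (acc.getLast h)]).length : Int) = (acc.length : Int) + 1 := by
      simp
    have := ih (acc ++ [pvDiffB (acc.getLast h)]) hne
    rw [hlen] at this
    rw [this, List.getLast_append_of_ne_nil (by simp), List.getLast_singleton]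
    · simp [pvChain]
    · simp

theorem pvRecB_eq_chain (m : Nat) : ∀ (lst : List Int), lst.length = m + 1 →
    pvRecB lst = [lst] ++ pvChain m lst := by
  induction m with
  | zero =>
    intro lst hl
    have hne : lst ≠ [] := fun h => by simp [h] at hl
    rw [pvRecB, if_neg hne, if_pos hl]
    rfl
  | succ m ih =>
    intro lst hl
    have hne : lst ≠ [] := fun h => by simp [h] at hl
    have h1 : lst.length ≠ 1 := by omega
    rw [pvRecB, if_neg hne, if_neg h1,
        ih (pvDiffB lst) (by rw [pvDiffB_length]; omega)]
    rfl

theorem pvFirstLevel (points : List (Int × Int)) :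
    (PySem.List.pyRange 0 (points.length : Int)).foldl
        (fun acc j => acc ++ [(PySem.List.pyGetD points j ((0 : Int), (0 : Int))).2]) []
      = points.map (fun p => p.2) := by
  rw [PySem.List.foldl_append_singleton_eq_map, List.nil_append]
  conv_rhs => rw [← PySem.List.map_pyGetD_pyRange_zero points ((0 : Int), (0 : Int))]
  simp [List.map_map, PySem.List.len, Function.comp_def]

-- ===== VERDICT (by name: the statement is the Claim_ definition above) =====
theorem divided_dif_operator_simple_spec : Claim_equal_divided_dif_operator_simple := by
  intro points _
  unfold Spec_divided_dif_operator_simple divided_dif_operator_simple divided_dif_operator_simple_alt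
  rcases Nat.eq_zero_or_pos points.length with h0 | hpos
  · rw [List.length_eq_zero_iff] at h0
    subst h0
    show ([] : List (List Int)) = pvRecB []
    rw [pvRecB]
    simp
  · set ys : List Int := points.map (fun p => p.2) with hys
    have hylen : ys.length = points.length := by simp [hys]
    have hcons : PySem.List.pyRange 0 (points.length : Int)
        = 0 :: PySem.List.pyRange 1 (points.length : Int) := by
      rw [PySem.List.pyRange_one_cons (by omega)]
      norm_num
    rw [hcons, List.foldl_cons]
    have hstep0 : pvStepA points [] 0 = [ys] := by
      unfold pvStepA
      rw [if_pos rfl, pvFirstLevel]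
      rfl
    rw [hstep0]
    have e1 : (([ys] : List (List Int)).length : Int) = 1 := by simp
    have e2 : (([ys] : List (List Int)).length : Int) + ((points.length - 1 : Nat) : Int)
        = (points.length : Int) := by simp; omega
    rw [show PySem.List.pyRange 1 (points.length : Int)
          = PySem.List.pyRange (([ys] : List (List Int)).length : Int)
              ((([ys] : List (List Int)).length : Int) + ((points.length - 1 : Nat) : Int)) from by
        rw [e2, e1]]
    rw [pvFoldA points (points.length - 1) [ys] (by simp)]
    rw [pvRecB_eq_chain (points.length - 1) ys (by omega)]
    rfl
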